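-- pv_equiv track=rewrite | github.com/mrmh2/teaching-scientific-computing | python/pvc/seqfilter.py | seqfilter
-- ===== SOURCE A (Python) =====
-- def seqfilter(input_sequence, allowed_chars):
--
--     good_chars = ''
--     bad_chars = ''
--     for c in input_sequence:
--         if c in allowed_chars:
--             good_chars += c
--         else:
--             bad_chars += c
--
--     return good_chars, bad_chars
-- ===== SOURCE B (Python) =====
-- def seqfilter(input_sequence, allowed_chars):
--     good_chars = ''.join(c for c in input_sequence if c in allowed_chars)
--     bad_chars = ''.join(c for c in input_sequence if c not in allowed_chars)
--     return good_chars, bad_chars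
-- ===== Notes on version B (the rewrite author's own statement) =====
-- stated objective: idiomatic
-- what changed: Replaces the single two-accumulator partitioning loop by two independent filtering scans joined into strings.
import Mathlib
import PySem

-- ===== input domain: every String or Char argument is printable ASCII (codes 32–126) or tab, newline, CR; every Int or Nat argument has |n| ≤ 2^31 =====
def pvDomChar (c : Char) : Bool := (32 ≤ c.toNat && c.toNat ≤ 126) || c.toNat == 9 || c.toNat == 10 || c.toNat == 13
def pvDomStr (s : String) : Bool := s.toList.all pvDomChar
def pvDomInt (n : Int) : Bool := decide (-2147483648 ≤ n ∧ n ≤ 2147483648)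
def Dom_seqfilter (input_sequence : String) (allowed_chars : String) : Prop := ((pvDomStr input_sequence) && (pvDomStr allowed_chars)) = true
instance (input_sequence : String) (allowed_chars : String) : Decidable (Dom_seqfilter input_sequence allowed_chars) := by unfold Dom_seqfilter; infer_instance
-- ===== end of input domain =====

-- B computes the two outputs by two independent filtering scans instead of A's single
-- two-accumulator partitioning loop (objective: idiomatic; same behaviour, same cost).

-- ===== PORT A =====
-- the loop over input_sequence maintaining (good_chars, bad_chars); 'c in allowed_chars'
-- for a single char c is exactly list membership of c in allowed_chars' characters
def seqfilter (input_sequence : String) (allowed_chars : String) : String × String :=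
  input_sequence.toList.foldl
    (fun (acc : String × String) c =>
      if allowed_chars.toList.contains c then (acc.1.push c, acc.2)
      else (acc.1, acc.2.push c))
    ("", "")

-- ===== PORT B =====
def seqfilter_alt (input_sequence : String) (allowed_chars : String) : String × String :=
  (String.ofList (input_sequence.toList.filter (fun c => allowed_chars.toList.contains c)),
   String.ofList (input_sequence.toList.filter (fun c => !allowed_chars.toList.contains c)))

-- ===== PRECONDITION & SPEC =====
def Spec_seqfilter (input_sequence : String) (allowed_chars : String) (out : String × String) : Prop := out = seqfilter_alt input_sequence allowed_chars
instance (input_sequence : String) (allowed_chars : String) (out : String × String) : Decidable (Spec_seqfilter input_sequence allowed_chars out) := by unfold Spec_seqfilter; infer_instance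

-- ===== CLAIM (what is proved, stated in full; the proofs are below) =====
def Claim_equal_seqfilter : Prop := ∀ (input_sequence : String) (allowed_chars : String), Dom_seqfilter input_sequence allowed_chars → Spec_seqfilter input_sequence allowed_chars (seqfilter input_sequence allowed_chars)

-- ===== LEMMAS AND PROOFS =====

-- ===== VERDICT (by name: the statement is the Claim_ definition above) =====
theorem push_ofList (l : List Char) (c : Char) :
    (String.ofList l).push c = String.ofList (l ++ [c]) := by
  apply String.toList_injective; simp

theorem foldl_part (a : String) (l : List Char) (good bad : List Char) :
    l.foldl
      (fun (acc : String × String) c =>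
        if a.toList.contains c then (acc.1.push c, acc.2)
        else (acc.1, acc.2.push c))
      (String.ofList good, String.ofList bad)
    = (String.ofList (good ++ l.filter (fun c => a.toList.contains c)),
       String.ofList (bad ++ l.filter (fun c => !a.toList.contains c))) := by
  induction l generalizing good bad with
  | nil => simp
  | cons c t ih =>
    simp only [List.foldl_cons, List.filter_cons]
    by_cases h : c ∈ a.toList
    · rw [if_pos (by simpa using h), push_ofList]
      simpa [h, List.append_assoc] using ih (good ++ [c]) bad
    · rw [if_neg (by simpa using h), push_ofList]
      simpa [h, List.append_assoc] using ih good (bad ++ [c])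

theorem seqfilter_spec : Claim_equal_seqfilter := by
  intro s a _
  unfold Spec_seqfilter seqfilter seqfilter_alt
  have h := foldl_part a s.toList [] []
  simpa using h
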